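-- pv_equiv track=rewrite | github.com/tcredo/pygif | lib/lzw.py | unpackCodes
-- ===== SOURCE A (Python) =====
-- MAXIMUM_CODE_SIZE = 12
--
-- def unpackCodes(data,codeSize=8):
--   """A generator that yields codes from packed bytes."""
--   bits = 0
--   nBits = 0
--   CLEAR = 1<<codeSize
--   highestCode = CLEAR+1
--   bitsPerCode = codeSize+1
--   while 8*len(data)+nBits>=bitsPerCode:
--     while nBits<bitsPerCode:
--       character, data = data[0], data[1:]
--       character = ord(character)
--       bits += character << nBits
--       nBits += 8
--     code = bits%(1<<bitsPerCode)
--     bits >>= bitsPerCode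
--     nBits -= bitsPerCode
--     if code==CLEAR:
--       highestCode = CLEAR+1
--       bitsPerCode = codeSize+1
--     else:
--       if highestCode<2**MAXIMUM_CODE_SIZE-1:
--         highestCode += 1
--         if highestCode>>bitsPerCode:
--           bitsPerCode += 1
--     yield code
-- ===== SOURCE B (Python) =====
-- MAXIMUM_CODE_SIZE = 12
--
-- def unpackCodes(data, codeSize=8):
--   """A generator that yields codes from packed bytes, addressing each code's bit
--   window [pos, pos+bitsPerCode) directly in the byte string (no rolling buffer)."""
--   totalBits = 8 * len(data)
--   CLEAR = 1 << codeSize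
--   highestCode = CLEAR + 1
--   bitsPerCode = codeSize + 1
--   pos = 0
--   while totalBits - pos >= bitsPerCode:
--     first = pos >> 3
--     last = (pos + bitsPerCode - 1) >> 3
--     chunk = 0
--     for j in range(last, first - 1, -1):
--       chunk = (chunk << 8) | ord(data[j])
--     code = (chunk >> (pos & 7)) & ((1 << bitsPerCode) - 1)
--     pos += bitsPerCode
--     if code == CLEAR:
--       highestCode = CLEAR + 1
--       bitsPerCode = codeSize + 1
--     else:
--       if highestCode < 2**MAXIMUM_CODE_SIZE - 1:
--         highestCode += 1
--         if highestCode >> bitsPerCode: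
--           bitsPerCode += 1
--     yield code
-- ===== Notes on version B (the rewrite author's own statement) =====
-- stated objective: faster
-- what changed: B drops A's rolling (bits, nBits) refill buffer and its repeated data = data[1:] string re-slicing, instead keeping one bit offset and reading each code's bit window directly from the 2-3 bytes that cover it.
import Mathlib
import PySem

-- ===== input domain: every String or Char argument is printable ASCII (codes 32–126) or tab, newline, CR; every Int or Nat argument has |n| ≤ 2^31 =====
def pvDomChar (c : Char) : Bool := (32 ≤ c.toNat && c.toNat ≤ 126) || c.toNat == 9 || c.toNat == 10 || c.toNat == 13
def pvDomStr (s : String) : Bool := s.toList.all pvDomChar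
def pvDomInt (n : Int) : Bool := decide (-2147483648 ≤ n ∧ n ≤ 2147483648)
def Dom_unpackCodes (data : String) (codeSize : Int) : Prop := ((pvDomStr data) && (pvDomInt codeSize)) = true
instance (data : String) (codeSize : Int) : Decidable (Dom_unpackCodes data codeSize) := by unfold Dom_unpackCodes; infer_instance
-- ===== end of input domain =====

-- B replaces A's rolling (bits, nBits) byte-refill buffer (and its quadratic data = data[1:]
-- slicing) by a single bit offset, reading each code's bit window directly from the byte
-- string (objective: faster, as measured). A is a generator; equivalence is about the list
-- of yielded codes.

-- ===== PORT A =====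
-- inner `while nBits < bitsPerCode:` loop of A (consumes one byte per step)
def fillA (data : List Char) (bits nBits bpc : Nat) : List Char × Nat × Nat :=
  if nBits < bpc then
    match data with
    | [] => ([], bits, nBits)   -- Python would raise IndexError here; unreachable under the outer guard
    | c :: rest => fillA rest (bits + (c.toNat <<< nBits)) (nBits + 8) bpc
  else (data, bits, nBits)
termination_by data.length
decreasing_by simp_all

-- outer `while 8*len(data)+nBits >= bitsPerCode:` loop of A; fuel only makes it total
def loopA (fuel : Nat) (data : List Char) (bits nBits CLEAR highestCode bpc cN : Nat) : List Int :=
  match fuel with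
  | 0 => []
  | fuel + 1 =>
    if bpc ≤ 8 * data.length + nBits then
      match fillA data bits nBits bpc with
      | (data', bits1, nBits1) =>
        let code := bits1 % (1 <<< bpc)
        let bits2 := bits1 >>> bpc
        let nBits2 := nBits1 - bpc
        if code = CLEAR then
          (code : Int) :: loopA fuel data' bits2 nBits2 CLEAR (CLEAR + 1) (cN + 1) cN
        else
          if highestCode < 2 ^ 12 - 1 then
            if (highestCode + 1) >>> bpc ≠ 0 then
              (code : Int) :: loopA fuel data' bits2 nBits2 CLEAR (highestCode + 1) (bpc + 1) cN
            else
              (code : Int) :: loopA fuel data' bits2 nBits2 CLEAR (highestCode + 1) bpc cN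
          else
            (code : Int) :: loopA fuel data' bits2 nBits2 CLEAR highestCode bpc cN
    else []

def unpackCodes (data : String) (codeSize : Int) : List Int :=
  if codeSize < 0 then []   -- Python: `1 << codeSize` raises ValueError; excluded by Pre_
  else
    let c := codeSize.toNat
    loopA (8 * data.toList.length + 1) data.toList 0 0 (1 <<< c) ((1 <<< c) + 1) (c + 1) c

-- ===== PORT B =====
-- `for j in range(last, first-1, -1): chunk = (chunk << 8) | ord(data[j])`
-- (cnt = number of iterations = last-first+1; data[j] is in range under the loop guard,
--  so the getD default is never read)
def chunkB (data : List Char) : Nat → Nat → Nat → Nat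
  | _, 0, chunk => chunk
  | j, cnt + 1, chunk => chunkB data (j - 1) cnt ((chunk <<< 8) ||| (data.getD j 'A').toNat)

-- `while totalBits - pos >= bitsPerCode:` loop of B; fuel only makes it total
def loopB (fuel : Nat) (data : List Char) (pos totalBits CLEAR highestCode bpc cN : Nat) : List Int :=
  match fuel with
  | 0 => []
  | fuel + 1 =>
    if bpc ≤ totalBits - pos then
      let first := pos >>> 3
      let last := (pos + bpc - 1) >>> 3
      let chunk := chunkB data last (last - first + 1) 0
      let code := (chunk >>> (pos &&& 7)) &&& ((1 <<< bpc) - 1)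
      if code = CLEAR then
        (code : Int) :: loopB fuel data (pos + bpc) totalBits CLEAR (CLEAR + 1) (cN + 1) cN
      else
        if highestCode < 2 ^ 12 - 1 then
          if (highestCode + 1) >>> bpc ≠ 0 then
            (code : Int) :: loopB fuel data (pos + bpc) totalBits CLEAR (highestCode + 1) (bpc + 1) cN
          else
            (code : Int) :: loopB fuel data (pos + bpc) totalBits CLEAR (highestCode + 1) bpc cN
        else
          (code : Int) :: loopB fuel data (pos + bpc) totalBits CLEAR highestCode bpc cN
    else []

def unpackCodes_alt (data : String) (codeSize : Int) : List Int :=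
  if codeSize < 0 then []   -- Python: `1 << codeSize` raises ValueError; excluded by Pre_
  else
    let c := codeSize.toNat
    loopB (8 * data.toList.length + 1) data.toList 0 (8 * data.toList.length)
      (1 <<< c) ((1 <<< c) + 1) (c + 1) c

-- ===== PRECONDITION & SPEC =====
-- Pre_ excludes negative codeSize, on which Python's `1 << codeSize` raises ValueError (in A and in B).
def Pre_unpackCodes (data : String) (codeSize : Int) : Prop := 0 ≤ codeSize
instance (data : String) (codeSize : Int) : Decidable (Pre_unpackCodes data codeSize) := by
  unfold Pre_unpackCodes; infer_instance

def pvWitness_unpackCodes : String × Int := ("AB", 2)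

def Spec_unpackCodes (data : String) (codeSize : Int) (out : List Int) : Prop := out = unpackCodes_alt data codeSize
instance (data : String) (codeSize : Int) (out : List Int) : Decidable (Spec_unpackCodes data codeSize out) := by unfold Spec_unpackCodes; infer_instance

-- ===== CLAIM (what is proved, stated in full; the proofs are below) =====
def Claim_equal_unpackCodes : Prop := ∀ (data : String) (codeSize : Int), Dom_unpackCodes data codeSize → Pre_unpackCodes data codeSize → Spec_unpackCodes data codeSize (unpackCodes data codeSize)

-- ===== LEMMAS AND PROOFS =====

/-- little-endian value of a byte string (proof-side abstraction) -/
def leVal : List Char → Nat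
  | [] => 0
  | c :: r => c.toNat + 256 * leVal r

theorem leVal_lt (l : List Char) (hA : ∀ c ∈ l, c.toNat < 256) :
    leVal l < 2 ^ (8 * l.length) := by
  induction l with
  | nil => simp [leVal]
  | cons c r ih =>
    have hc : c.toNat < 256 := hA c (by simp)
    have hr := ih (fun x hx => hA x (by simp [hx]))
    simp only [leVal, List.length_cons]
    rw [show 8 * (r.length + 1) = 8 * r.length + 8 by ring, pow_add]
    nlinarith [hr, hc]

theorem leVal_split (l : List Char) (n : Nat) (h : n ≤ l.length) :
    leVal l = leVal (l.take n) + 2 ^ (8 * n) * leVal (l.drop n) := by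
  induction l generalizing n with
  | nil => simp [leVal]
  | cons c r ih =>
    cases n with
    | zero => simp [leVal]
    | succ m =>
      simp only [List.take_succ_cons, List.drop_succ_cons, leVal]
      rw [ih m (by simpa using h), show 8 * (m + 1) = 8 * m + 8 by ring, pow_add]
      ring

theorem leVal_take_succ (l : List Char) (m : Nat) (h : m < l.length) :
    leVal (l.take (m + 1)) = leVal (l.take m) + (l.getD m 'A').toNat * 2 ^ (8 * m) := by
  induction l generalizing m with
  | nil => simp at h
  | cons c r ih =>
    cases m with
    | zero => simp [leVal]
    | succ k =>
      simp only [List.take_succ_cons, leVal, List.getD_cons_succ]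
      rw [ih k (by simpa using h), show 8 * (k + 1) = 8 * k + 8 by ring, pow_add]
      ring

theorem chunkB_spec (L : List Char) (hA : ∀ c ∈ L, c.toNat < 256) (cnt : Nat) :
    ∀ (j chunk : Nat), cnt ≤ j + 1 → j < L.length →
      chunkB L j cnt chunk = leVal ((L.drop (j + 1 - cnt)).take cnt) + chunk * 2 ^ (8 * cnt) := by
  induction cnt with
  | zero => intro j chunk _ _; simp [chunkB, leVal]
  | succ cnt ih =>
    intro j chunk hcnt hj
    rw [chunkB, ih (j - 1) _ (by omega) (by omega)]
    have hlists : (L.drop (j - 1 + 1 - cnt)).take cnt = (L.drop (j - cnt)).take cnt := by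
      cases cnt with
      | zero => simp
      | succ m => rw [show j - 1 + 1 - (m + 1) = j - (m + 1) by omega]
    have hidx : j + 1 - (cnt + 1) = j - cnt := by omega
    rw [hlists, hidx]
    have hlen : cnt < (L.drop (j - cnt)).length := by
      rw [List.length_drop]; omega
    have hget : (L.drop (j - cnt)).getD cnt 'A' = L.getD j 'A' := by
      simp [List.getD_eq_getElem?_getD, List.getElem?_drop, show j - cnt + cnt = j by omega]
    have hjmem : L.getD j 'A' ∈ L := by
      rw [List.getD_eq_getElem?_getD, List.getElem?_eq_getElem hj]
      exact List.getElem_mem hj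
    have hor : (chunk <<< 8) ||| (L.getD j 'A').toNat = chunk * 2 ^ 8 + (L.getD j 'A').toNat := by
      rw [← Nat.shiftLeft_add_eq_or_of_lt (hA _ hjmem), Nat.shiftLeft_eq]
    rw [leVal_take_succ _ cnt hlen, hget, hor,
      show 8 * (cnt + 1) = 8 * cnt + 8 by ring, pow_add]
    ring

theorem window_mod (X Y r bpc m : Nat) (h : r + bpc ≤ m) :
    (X + 2 ^ m * Y) / 2 ^ r % 2 ^ bpc = X / 2 ^ r % 2 ^ bpc := by
  rw [show m = r + (bpc + (m - r - bpc)) by omega, pow_add, mul_assoc,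
    Nat.add_mul_div_left _ _ (Nat.two_pow_pos r), pow_add, mul_assoc,
    Nat.add_mul_mod_self_left]

-- extracting the window [pos, pos+bpc) via direct byte addressing equals shifting the whole stream
theorem code_window (L : List Char) (hA : ∀ c ∈ L, c.toNat < 256) (pos bpc : Nat) (hbpc : 1 ≤ bpc)
    (hle : pos + bpc ≤ 8 * L.length) :
    (chunkB L ((pos + bpc - 1) >>> 3) (((pos + bpc - 1) >>> 3) - (pos >>> 3) + 1) 0
        >>> (pos &&& 7)) &&& ((1 <<< bpc) - 1)
      = (leVal L >>> pos) % 2 ^ bpc := by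
  rw [show (7 : Nat) = 2 ^ 3 - 1 from rfl, Nat.and_two_pow_sub_one_eq_mod,
    Nat.shiftLeft_eq, one_mul, Nat.and_two_pow_sub_one_eq_mod]
  rw [show pos >>> 3 = pos / 8 from Nat.shiftRight_eq_div_pow pos 3,
    show (pos + bpc - 1) >>> 3 = (pos + bpc - 1) / 8 from Nat.shiftRight_eq_div_pow _ 3,
    show pos % 2 ^ 3 = pos % 8 from rfl]
  set first := pos / 8 with hfirst
  set last := (pos + bpc - 1) / 8 with hlast
  set r := pos % 8 with hr
  have h1 : 8 * first + r = pos := Nat.div_add_mod pos 8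
  have h2 : r < 8 := Nat.mod_lt pos (by norm_num)
  have h3 := Nat.div_add_mod (pos + bpc - 1) 8
  have h4 : (pos + bpc - 1) % 8 < 8 := Nat.mod_lt _ (by norm_num)
  have hfl : first ≤ last := Nat.div_le_div_right (by omega)
  have hlast_lt : last < L.length := by omega
  set cnt := last - first + 1 with hcnt
  -- the chunk is the little-endian value of bytes first..last
  have hchunk : chunkB L last cnt 0 = leVal ((L.drop first).take cnt) := by
    rw [chunkB_spec L hA cnt last 0 (by omega) hlast_lt,
      show last + 1 - cnt = first by omega]
    simp
  rw [hchunk, Nat.shiftRight_eq_div_pow]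
  -- shifting the whole stream past `first` bytes
  have hflen : first ≤ L.length := by omega
  have hshift8 : leVal L / 2 ^ (8 * first) = leVal (L.drop first) := by
    rw [leVal_split L first hflen,
      Nat.add_mul_div_left _ _ (Nat.two_pow_pos (8 * first)),
      Nat.div_eq_of_lt, Nat.zero_add]
    have := leVal_lt (L.take first) (fun c hc => hA c (List.mem_of_mem_take hc))
    calc leVal (L.take first) < 2 ^ (8 * (L.take first).length) := this
      _ ≤ 2 ^ (8 * first) := Nat.pow_le_pow_right (by norm_num) (by simp)
  have hL' : cnt ≤ (L.drop first).length := by rw [List.length_drop]; omega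
  have hwin : 8 * cnt ≥ r + bpc := by omega
  have hR : leVal L >>> pos = leVal (L.drop first) / 2 ^ r := by
    rw [Nat.shiftRight_eq_div_pow, show pos = 8 * first + r by omega, pow_add,
      ← Nat.div_div_eq_div_mul, hshift8]
  rw [hR, leVal_split (L.drop first) cnt hL', window_mod _ _ _ _ _ hwin]

theorem fillA_spec (data : List Char) (bits nBits bpc : Nat)
    (h : bpc ≤ 8 * data.length + nBits) :
    ∃ data' bits' nBits',
      fillA data bits nBits bpc = (data', bits', nBits') ∧
      bpc ≤ nBits' ∧
      8 * data'.length + nBits' = 8 * data.length + nBits ∧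
      bits' + leVal data' * 2 ^ nBits' = bits + leVal data * 2 ^ nBits := by
  induction data generalizing bits nBits with
  | nil =>
    refine ⟨[], bits, nBits, ?_, ?_, rfl, rfl⟩
    · rw [fillA]; simp at h; simp [Nat.not_lt.mpr h]
    · simpa using h
  | cons c r ih =>
    by_cases hlt : nBits < bpc
    · have h' : bpc ≤ 8 * r.length + (nBits + 8) := by simp at h; omega
      obtain ⟨d', b', n', heq, h1, h2, h3⟩ := ih (bits + (c.toNat <<< nBits)) (nBits + 8) h'
      refine ⟨d', b', n', ?_, h1, by simp at h2 ⊢; omega, ?_⟩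
      · rw [fillA]; simp [hlt, heq]
      · rw [h3, Nat.shiftLeft_eq, leVal, pow_add]
        ring
    · refine ⟨c :: r, bits, nBits, ?_, by omega, rfl, rfl⟩
      rw [fillA]; simp [hlt]

theorem loop_eq (fuel : Nat) (L data : List Char) (bits nBits pos totalBits CLEAR highestCode bpc cN : Nat)
    (hA : ∀ c ∈ L, c.toNat < 256)
    (hbpc : 1 ≤ bpc)
    (htot : leVal L >>> pos = bits + leVal data * 2 ^ nBits)
    (hlen : 8 * data.length + nBits + pos = totalBits)
    (hL : totalBits = 8 * L.length) :
    loopA fuel data bits nBits CLEAR highestCode bpc cN =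
      loopB fuel L pos totalBits CLEAR highestCode bpc cN := by
  induction fuel generalizing data bits nBits pos highestCode bpc with
  | zero => rfl
  | succ fuel ih =>
    rw [loopA, loopB]
    have hguard : (bpc ≤ 8 * data.length + nBits) ↔ (bpc ≤ totalBits - pos) := by omega
    by_cases hg : bpc ≤ 8 * data.length + nBits
    · obtain ⟨data', bits1, nBits1, hfill, hb1, hb2, hb3⟩ := fillA_spec data bits nBits bpc hg
      simp only [hfill, if_pos hg, if_pos (hguard.mp hg)]
      have hpow : (0:Nat) < 2 ^ bpc := Nat.two_pow_pos bpc
      have hsplit : leVal data' * 2 ^ nBits1 = (leVal data' * 2 ^ (nBits1 - bpc)) * 2 ^ bpc := by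
        rw [mul_assoc, ← pow_add]
        congr 2
        omega
      -- the extracted code is the same
      have hcode : (chunkB L ((pos + bpc - 1) >>> 3) (((pos + bpc - 1) >>> 3) - (pos >>> 3) + 1) 0
          >>> (pos &&& 7)) &&& ((1 <<< bpc) - 1) = bits1 % (1 <<< bpc) := by
        rw [code_window L hA pos bpc hbpc (by omega), htot, ← hb3, hsplit,
          Nat.add_mul_mod_self_right, Nat.shiftLeft_eq, one_mul]
      -- the advanced stream state is the same
      have hrest : leVal L >>> (pos + bpc) = (bits1 >>> bpc) + leVal data' * 2 ^ (nBits1 - bpc) := by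
        rw [Nat.shiftRight_add, htot, ← hb3, hsplit, Nat.shiftRight_eq_div_pow,
          Nat.shiftRight_eq_div_pow, Nat.add_mul_div_right _ _ hpow]
      have hlen' : 8 * data'.length + (nBits1 - bpc) + (pos + bpc) = totalBits := by omega
      rw [hcode]
      by_cases hc : bits1 % (1 <<< bpc) = CLEAR
      · rw [if_pos hc, if_pos hc]
        exact congrArg _ (ih _ _ _ _ _ _ (by omega) hrest hlen')
      · rw [if_neg hc, if_neg hc]
        by_cases hh : highestCode < 2 ^ 12 - 1
        · rw [if_pos hh, if_pos hh]
          by_cases hs : (highestCode + 1) >>> bpc ≠ 0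
          · rw [if_pos hs, if_pos hs]
            exact congrArg _ (ih _ _ _ _ _ _ (by omega) hrest hlen')
          · rw [if_neg hs, if_neg hs]
            exact congrArg _ (ih _ _ _ _ _ _ (by omega) hrest hlen')
        · rw [if_neg hh, if_neg hh]
          exact congrArg _ (ih _ _ _ _ _ _ (by omega) hrest hlen')
    · simp [hg, hguard.not.mp hg]

-- ===== VERDICT (by name: the statement is the Claim_ definition above) =====
theorem unpackCodes_spec : Claim_equal_unpackCodes := by
  intro data codeSize _ hpre
  unfold Spec_unpackCodes unpackCodes unpackCodes_alt
  have hneg : ¬ codeSize < 0 := not_lt.mpr hpre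
  simp only [hneg, ite_false]
  refine loop_eq _ _ _ _ _ _ _ _ _ _ _ ?_ (by omega) (by simp) (by simp) rfl
  intro c hc
  have hd : pvDomStr data = true := by
    rename_i hDom
    unfold Dom_unpackCodes at hDom
    exact (Bool.and_eq_true_iff.mp hDom).1
  have := (List.all_eq_true.mp hd) c hc
  unfold pvDomChar at this
  simp only [Bool.or_eq_true, Bool.and_eq_true, decide_eq_true_eq, beq_iff_eq] at this
  omega
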